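-- pv_equiv track=rewrite | github.com/apposed/appose | bin/postprocess-api.py | split_union
-- ===== SOURCE A (Python) =====
-- from typing import List, Tuple
--
-- def split_union(type_str: str) -> List[str]:
--     """
--     Split a union type into its components, handling nested types.
--
--     Example: 'str | Path | None' -> ['str', 'Path', 'None']
--     Example: 'list[str] | dict[str, int]' -> ['list[str]', 'dict[str, int]']
--     """
--     if '|' not in type_str:
--         return [type_str]
--
--     # Track bracket depth to avoid splitting inside generic types
--     parts = []
--     current = []
--     depth = 0
--
--     for char in type_str:
--         if char == '[':
--             depth += 1
--             current.append(char)
--         elif char == ']':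
--             depth -= 1
--             current.append(char)
--         elif char == '|' and depth == 0:
--             parts.append(''.join(current).strip())
--             current = []
--         else:
--             current.append(char)
--
--     if current:
--         parts.append(''.join(current).strip())
--
--     return parts
-- ===== SOURCE B (Python) =====
-- def split_union(type_str):
--     if '|' not in type_str:
--         return [type_str]
--     return _segments(type_str)
--
--
-- def _segments(s):
--     head_tail = _cut(s)
--     if head_tail is None:
--         return [s.strip()] if s else []
--     head, tail = head_tail
--     return [head.strip()] + _segments(tail)
--
--
-- def _cut(s):
--     """Return (before, after) around the first top-level '|', or None."""
--     depth = 0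
--     for i, ch in enumerate(s):
--         if ch == '[':
--             depth += 1
--         elif ch == ']':
--             depth -= 1
--         elif ch == '|' and depth == 0:
--             return s[:i], s[i + 1:]
--     return None
-- ===== Notes on version B (the rewrite author's own statement) =====
-- stated objective: alternative
-- what changed: Replaces A's single accumulator loop (parts/current/depth state plus a trailing flush) by a recursive decomposition: a helper finds the first top-level pipe separator and returns the two slices, and the splitter recurses on the tail.
import Mathlib
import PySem

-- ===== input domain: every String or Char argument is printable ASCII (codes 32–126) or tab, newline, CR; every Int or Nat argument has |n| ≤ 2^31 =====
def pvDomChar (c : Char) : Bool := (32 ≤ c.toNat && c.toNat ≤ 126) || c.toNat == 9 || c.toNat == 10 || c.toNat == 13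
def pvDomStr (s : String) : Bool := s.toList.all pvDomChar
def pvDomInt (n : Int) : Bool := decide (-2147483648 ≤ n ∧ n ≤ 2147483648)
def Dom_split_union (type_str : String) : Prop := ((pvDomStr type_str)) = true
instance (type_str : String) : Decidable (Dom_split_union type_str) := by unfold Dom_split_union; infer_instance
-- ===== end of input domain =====

-- B is an alternative decomposition: a cut-off-the-first-segment helper plus recursion on the tail,
-- instead of A's one fold with parts/current/depth accumulator state and a trailing flush.

-- ===== PORT A =====
-- one loop iteration of A's `for char in type_str` (state = (parts, current, depth))
def pvStepA (st : List String × List Char × Int) (ch : Char) : List String × List Char × Int :=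
  if ch = '[' then (st.1, st.2.1 ++ [ch], st.2.2 + 1)
  else if ch = ']' then (st.1, st.2.1 ++ [ch], st.2.2 - 1)
  else if ch = '|' ∧ st.2.2 = 0 then (st.1 ++ [PySem.Str.strip (String.ofList st.2.1)], [], st.2.2)
  else (st.1, st.2.1 ++ [ch], st.2.2)

def split_union (type_str : String) : List String :=
  if PySem.Str.isIn "|" type_str = false then [type_str]
  else
    let st := type_str.toList.foldl pvStepA ([], [], 0)
    if st.2.1 ≠ [] then st.1 ++ [PySem.Str.strip (String.ofList st.2.1)] else st.1

-- ===== PORT B =====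
-- _cut: first top-level '|' → (before, after), scanning with a running depth (port of Source B's index loop via slices)
def pvCut : List Char → Int → Option (List Char × List Char)
  | [], _ => none
  | ch :: t, d =>
    if ch = '[' then (pvCut t (d + 1)).map (fun p => (ch :: p.1, p.2))
    else if ch = ']' then (pvCut t (d - 1)).map (fun p => (ch :: p.1, p.2))
    else if ch = '|' ∧ d = 0 then some ([], t)
    else (pvCut t d).map (fun p => (ch :: p.1, p.2))

theorem pvCut_tail_lt : ∀ (s : List Char) (d : Int) (a b : List Char),
    pvCut s d = some (a, b) → b.length < s.length := by
  intro s
  induction s with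
  | nil => intro d a b h; simp [pvCut] at h
  | cons ch t ih =>
    intro d a b h
    simp only [pvCut] at h
    split_ifs at h with h1 h2 h3
    · rcases Option.map_eq_some_iff.mp h with ⟨⟨a', b'⟩, hc, he⟩
      cases he; exact Nat.lt_succ_of_lt (ih _ _ _ hc)
    · rcases Option.map_eq_some_iff.mp h with ⟨⟨a', b'⟩, hc, he⟩
      cases he; exact Nat.lt_succ_of_lt (ih _ _ _ hc)
    · cases h; simp
    · rcases Option.map_eq_some_iff.mp h with ⟨⟨a', b'⟩, hc, he⟩
      cases he; exact Nat.lt_succ_of_lt (ih _ _ _ hc)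

-- _segments: strip the head segment, recurse on the tail
def pvSegs (s : List Char) : List String :=
  match h : pvCut s 0 with
  | none => if s = [] then [] else [PySem.Str.strip (String.ofList s)]
  | some (a, b) => PySem.Str.strip (String.ofList a) :: pvSegs b
termination_by s.length
decreasing_by exact pvCut_tail_lt s 0 a b h

def split_union_alt (type_str : String) : List String :=
  if PySem.Str.isIn "|" type_str = false then [type_str]
  else pvSegs type_str.toList

-- ===== PRECONDITION & SPEC =====
def Spec_split_union (type_str : String) (out : List String) : Prop := out = split_union_alt type_str
instance (type_str : String) (out : List String) : Decidable (Spec_split_union type_str out) := by unfold Spec_split_union; infer_instance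

-- ===== CLAIM (what is proved, stated in full; the proofs are below) =====
def Claim_equal_split_union : Prop := ∀ (type_str : String), Dom_split_union type_str → Spec_split_union type_str (split_union type_str)

-- ===== LEMMAS AND PROOFS =====

-- net bracket depth contributed by a chunk of characters
def pvDelta : List Char → Int
  | [] => 0
  | ch :: t => (if ch = '[' then 1 else if ch = ']' then -1 else 0) + pvDelta t

theorem pvDelta_append (xs ys : List Char) : pvDelta (xs ++ ys) = pvDelta xs + pvDelta ys := by
  induction xs with
  | nil => simp [pvDelta]
  | cons ch t ih => simp [pvDelta, ih]; ring

theorem pvCut_append_none (xs ys : List Char) (d : Int) (h : pvCut xs d = none) :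
    pvCut (xs ++ ys) d = (pvCut ys (d + pvDelta xs)).map (fun p => (xs ++ p.1, p.2)) := by
  induction xs generalizing d with
  | nil =>
    simp only [List.nil_append, pvDelta, add_zero]
    cases pvCut ys d <;> rfl
  | cons ch t ih =>
    simp only [pvCut, List.cons_append] at h ⊢
    split_ifs at h ⊢ with h1 h2 h3
    · subst h1
      rw [ih _ (Option.map_eq_none_iff.mp h)]
      have harg : d + pvDelta ('[' :: t) = d + 1 + pvDelta t := by
        simp [pvDelta]; try ring
      rw [harg]
      cases pvCut ys (d + 1 + pvDelta t) <;> rfl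
    · subst h2
      rw [ih _ (Option.map_eq_none_iff.mp h)]
      have harg : d + pvDelta (']' :: t) = d - 1 + pvDelta t := by
        simp [pvDelta]; try ring
      rw [harg]
      cases pvCut ys (d - 1 + pvDelta t) <;> rfl
    · rw [ih _ (Option.map_eq_none_iff.mp h)]
      have harg : d + pvDelta (ch :: t) = d + pvDelta t := by
        simp [pvDelta, h1, h2]
      rw [harg]
      cases pvCut ys (d + pvDelta t) <;> rfl

-- the finalization after A's loop
def pvFin (st : List String × List Char × Int) : List String :=
  if st.2.1 ≠ [] then st.1 ++ [PySem.Str.strip (String.ofList st.2.1)] else st.1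

theorem pvSegs_none (s : List Char) (h : pvCut s 0 = none) :
    pvSegs s = if s = [] then [] else [PySem.Str.strip (String.ofList s)] := by
  rw [pvSegs]; rw [h]

theorem pvSegs_some (s a b : List Char) (h : pvCut s 0 = some (a, b)) :
    pvSegs s = PySem.Str.strip (String.ofList a) :: pvSegs b := by
  rw [pvSegs]; rw [h]

-- main loop invariant: A's fold started with current/depth consistent computes B's recursion
theorem pvLoop (rest : List Char) : ∀ (parts : List String) (current : List Char),
    pvCut current 0 = none →
    pvFin (rest.foldl pvStepA (parts, current, pvDelta current)) = parts ++ pvSegs (current ++ rest) := by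
  induction rest with
  | nil =>
    intro parts current hc
    simp only [List.foldl_nil, List.append_nil, pvFin, pvSegs_none current hc]
    by_cases h : current = [] <;> simp [h]
  | cons ch r ih =>
    intro parts current hc
    rw [List.foldl_cons]
    by_cases h1 : ch = '['
    · subst h1
      have hd : pvDelta (current ++ ['[']) = pvDelta current + 1 := by
        simp [pvDelta_append, pvDelta]
      have hstep : pvStepA (parts, current, pvDelta current) '['
          = (parts, current ++ ['['], pvDelta (current ++ ['['])) := by
        rw [hd]; simp [pvStepA]
      rw [hstep, ih parts (current ++ ['['])
          (by rw [pvCut_append_none _ _ _ hc]; simp [pvCut])]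
      simp
    · by_cases h2 : ch = ']'
      · subst h2
        have hd : pvDelta (current ++ [']']) = pvDelta current - 1 := by
          simp [pvDelta_append, pvDelta]; ring
        have hstep : pvStepA (parts, current, pvDelta current) ']'
            = (parts, current ++ [']'], pvDelta (current ++ [']'])) := by
          rw [hd]; simp [pvStepA]
        rw [hstep, ih parts (current ++ [']'])
            (by rw [pvCut_append_none _ _ _ hc]; simp [pvCut])]
        simp
      · by_cases h3 : ch = '|' ∧ pvDelta current = 0
        · obtain ⟨h3a, h3b⟩ := h3
          subst h3a
          have hstep : pvStepA (parts, current, pvDelta current) '|'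
              = (parts ++ [PySem.Str.strip (String.ofList current)], [], pvDelta ([] : List Char)) := by
            simp [pvStepA, h3b, pvDelta]
          rw [hstep, ih _ [] rfl]
          rw [pvSegs_some (current ++ '|' :: r) current r
              (by rw [pvCut_append_none _ _ _ hc]; simp [pvCut, h3b])]
          simp
        · have hd : pvDelta (current ++ [ch]) = pvDelta current := by
            simp [pvDelta_append, pvDelta, h1, h2]
          have hstep : pvStepA (parts, current, pvDelta current) ch
              = (parts, current ++ [ch], pvDelta (current ++ [ch])) := by
            rw [hd]
            simp only [pvStepA, if_neg h1, if_neg h2, if_neg h3]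
          rw [hstep, ih parts (current ++ [ch])
            (by
              rw [pvCut_append_none _ _ _ hc]
              have hone : pvCut [ch] (0 + pvDelta current) = none := by
                by_cases g1 : ch = '['
                · simp [pvCut, g1]
                · by_cases g2 : ch = ']'
                  · simp [pvCut, g1, g2]
                  · have g3 : ¬(ch = '|' ∧ 0 + pvDelta current = 0) :=
                      fun hp => h3 ⟨hp.1, by omega⟩
                    simp [pvCut, g1, g2]
                    intro a b
                    exact g3 ⟨a, by omega⟩
              rw [hone]; rfl)]
          simp

-- ===== VERDICT (by name: the statement is the Claim_ definition above) =====
theorem split_union_spec : Claim_equal_split_union := by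
  intro type_str _
  unfold Spec_split_union split_union split_union_alt
  by_cases hg : PySem.Str.isIn "|" type_str = false
  · rw [if_pos hg, if_pos hg]
  · rw [if_neg hg, if_neg hg]
    have := pvLoop type_str.toList [] [] rfl
    simpa [pvFin, pvDelta] using this
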